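-- pv_equiv track=rewrite | github.com/hansonhl/anagen | anagen/rsa_model.py | orig_to_gpt_speakers
-- ===== SOURCE A (Python) =====
-- def orig_to_gpt_speakers(speakers, gpt_word_to_subtok_end_map):
--     assert len(speakers) == len(gpt_word_to_subtok_end_map)
--     res = []
--     j = 0
--     for i in range(len(speakers)):
--         while j <= gpt_word_to_subtok_end_map[i]:
--             res.append(speakers[i])
--             j += 1
--     return res
-- ===== SOURCE B (Python) =====
-- def orig_to_gpt_speakers(speakers, gpt_word_to_subtok_end_map):
--     assert len(speakers) == len(gpt_word_to_subtok_end_map)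
--     # Stage 1: boundary array; prefix[i] = total subtokens emitted for words 0..i-1,
--     # i.e. the running maximum of 0 and the ends+1 (the cursor never moves backwards).
--     prefix = [0]
--     for e in gpt_word_to_subtok_end_map:
--         prefix.append(max(prefix[-1], e + 1))
--     # Stage 2: each word i owns the half-open block [prefix[i], prefix[i+1]).
--     return [s for s, lo, hi in zip(speakers, prefix, prefix[1:]) for _ in range(hi - lo)]
-- ===== Notes on version B (the rewrite author's own statement) =====
-- stated objective: alternative
-- what changed: Replaces A's single interleaved pass (inner while loop emitting one element per cursor step) by two staged passes: first build the monotone boundary array of running maxima prefix[i]=max(0,max(ends[:i]+1)), then block-fill each word's half-open block [prefix[i],prefix[i+1]) by a comprehension over consecutive boundaries.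
import Mathlib
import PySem

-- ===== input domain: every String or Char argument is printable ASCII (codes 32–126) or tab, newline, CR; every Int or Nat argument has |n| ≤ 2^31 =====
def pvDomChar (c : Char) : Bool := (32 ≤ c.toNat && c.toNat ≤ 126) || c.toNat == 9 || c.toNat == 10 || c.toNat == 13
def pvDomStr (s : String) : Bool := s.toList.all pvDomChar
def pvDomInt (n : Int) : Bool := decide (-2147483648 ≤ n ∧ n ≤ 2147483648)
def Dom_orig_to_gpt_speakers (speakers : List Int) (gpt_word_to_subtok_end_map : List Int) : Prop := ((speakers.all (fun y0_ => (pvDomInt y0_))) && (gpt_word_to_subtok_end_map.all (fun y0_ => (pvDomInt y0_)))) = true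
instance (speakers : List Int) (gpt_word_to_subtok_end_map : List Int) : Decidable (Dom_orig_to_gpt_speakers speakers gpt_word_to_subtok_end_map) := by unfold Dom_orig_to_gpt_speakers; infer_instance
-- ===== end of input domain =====

-- B replaces A's interleaved cursor/while pass by two staged passes: first a
-- monotone boundary array of running maxima, then a block fill over consecutive
-- boundaries (objective: alternative decomposition).

-- ===== PORT A =====
-- A's inner `while j <= end: res.append(s); j += 1`, returning the appended
-- block and the final cursor; one element per iteration, exactly as in Python.
def pvWhileA (s e j : Int) : List Int × Int :=
  if h : j ≤ e then
    let r := pvWhileA s e (j + 1)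
    (s :: r.1, r.2)
  else ([], j)
termination_by (e + 1 - j).toNat
decreasing_by omega

-- A's for-loop over i in range(len); since the assert guarantees equal lengths,
-- indexing both lists by i is exactly a walk over their zip.
def pvGoA : List (Int × Int) → Int → List Int
  | [], _ => []
  | (s, e) :: rest, j =>
    let r := pvWhileA s e j
    r.1 ++ pvGoA rest r.2

def orig_to_gpt_speakers (speakers : List Int) (gpt_word_to_subtok_end_map : List Int) : List Int :=
  pvGoA (speakers.zip gpt_word_to_subtok_end_map) 0

-- ===== PORT B =====
-- Stage 1 of Source B: `for e in m: prefix.append(max(prefix[-1], e+1))`, carrying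
-- the last boundary p; the full boundary list is 0 :: pvPrefixB m 0.
def pvPrefixB : List Int → Int → List Int
  | [], _ => []
  | e :: rest, p =>
    let q := max p (e + 1)
    q :: pvPrefixB rest q

def orig_to_gpt_speakers_alt (speakers : List Int) (gpt_word_to_subtok_end_map : List Int) : List Int :=
  let pfx : List Int := 0 :: pvPrefixB gpt_word_to_subtok_end_map 0
  -- Stage 2 of Source B: zip(speakers, prefix, prefix[1:]) and emit range(hi-lo)
  -- copies of s (range yields max 0 (hi-lo) elements, = (hi-lo).toNat);
  -- prefix[1:] of 0 :: t is t.
  (speakers.zip (pfx.zip (pvPrefixB gpt_word_to_subtok_end_map 0))).flatMap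
    (fun p => List.replicate (p.2.2 - p.2.1).toNat p.1)

-- ===== PRECONDITION & SPEC =====
-- Pre_: the Python assert raises AssertionError unless the lists have equal length.
def Pre_orig_to_gpt_speakers (speakers : List Int) (gpt_word_to_subtok_end_map : List Int) : Prop :=
  speakers.length = gpt_word_to_subtok_end_map.length
instance (speakers : List Int) (gpt_word_to_subtok_end_map : List Int) : Decidable (Pre_orig_to_gpt_speakers speakers gpt_word_to_subtok_end_map) := by unfold Pre_orig_to_gpt_speakers; infer_instance

def pvWitness_orig_to_gpt_speakers : List Int × List Int := ([5, 7, 7], [1, 0, 4])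

def Spec_orig_to_gpt_speakers (speakers : List Int) (gpt_word_to_subtok_end_map : List Int) (out : List Int) : Prop := out = orig_to_gpt_speakers_alt speakers gpt_word_to_subtok_end_map
instance (speakers : List Int) (gpt_word_to_subtok_end_map : List Int) (out : List Int) : Decidable (Spec_orig_to_gpt_speakers speakers gpt_word_to_subtok_end_map out) := by unfold Spec_orig_to_gpt_speakers; infer_instance

-- ===== CLAIM (what is proved, stated in full; the proofs are below) =====
def Claim_equal_orig_to_gpt_speakers : Prop := ∀ (speakers : List Int) (gpt_word_to_subtok_end_map : List Int), Dom_orig_to_gpt_speakers speakers gpt_word_to_subtok_end_map → Pre_orig_to_gpt_speakers speakers gpt_word_to_subtok_end_map → Spec_orig_to_gpt_speakers speakers gpt_word_to_subtok_end_map (orig_to_gpt_speakers speakers gpt_word_to_subtok_end_map)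

-- ===== LEMMAS AND PROOFS =====
lemma pvWhileA_eq (s e j : Int) :
    pvWhileA s e j = (List.replicate (max j (e + 1) - j).toNat s, max j (e + 1)) := by
  by_cases h : j ≤ e
  · have hn : (max j (e + 1) - j).toNat = (max (j + 1) (e + 1) - (j + 1)).toNat + 1 := by omega
    rw [pvWhileA, dif_pos h, pvWhileA_eq s e (j + 1), hn]
    simp [List.replicate_succ]
    omega
  · rw [pvWhileA, dif_neg h]
    have h1 : (max j (e + 1) - j).toNat = 0 := by omega
    have h2 : max j (e + 1) = j := by omega
    simp [h2]
termination_by (e + 1 - j).toNat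
decreasing_by omega

-- A's interleaved pass, started at cursor j, equals B's boundary-then-fill
-- scheme with boundary list j :: pvPrefixB es j.
lemma pvGoA_eq_fill (ss es : List Int) (j : Int) :
    pvGoA (ss.zip es) j =
      (ss.zip ((j :: pvPrefixB es j).zip (pvPrefixB es j))).flatMap
        (fun p => List.replicate (p.2.2 - p.2.1).toNat p.1) := by
  induction es generalizing ss j with
  | nil => cases ss <;> simp [pvGoA, pvPrefixB]
  | cons e rest ih =>
    cases ss with
    | nil => simp [pvGoA]
    | cons s ss' =>
      simp only [List.zip_cons_cons, pvGoA, pvWhileA_eq, pvPrefixB, List.flatMap_cons]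
      rw [ih]

-- ===== VERDICT (by name: the statement is the Claim_ definition above) =====
theorem orig_to_gpt_speakers_spec : Claim_equal_orig_to_gpt_speakers := by
  intro speakers m _ _
  unfold Spec_orig_to_gpt_speakers orig_to_gpt_speakers orig_to_gpt_speakers_alt
  exact pvGoA_eq_fill speakers m 0
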